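-- pv_equiv track=rewrite | github.com/aorursy/new-nb-6 | rootofarch_roberta-w-preprocessing.py | fix_difference
-- ===== SOURCE A (Python) =====
-- def fix_difference(old_word, new_word, oldtext_w_n, newtext_w, newtext_w_n, word_ind, expand_number):
--
--     new_word = [word for word in new_word if word != ""] # simple empty word delete function
--
--     if len(new_word) == 0:
--
--         newtext_w.pop(word_ind+expand_number)
--
--         if newtext_w_n is not None:
--
--             newtext_w_n.pop(word_ind+expand_number)
--
--         expand_number -= 1
--
--     elif (len(new_word) > 1) | (new_word[0] != old_word):
--
--         for i, word in enumerate(new_word):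
--
--             if i == 0:
--
--                 newtext_w[word_ind+expand_number] = word
--
--             else:
--
--                 expand_number += 1
--
--                 newtext_w.insert(word_ind+expand_number,word)
--
--                 if newtext_w_n is not None:
--
--                     newtext_w_n.insert(word_ind+expand_number,oldtext_w_n[word_ind])
--
--     return newtext_w, newtext_w_n, expand_number
-- ===== SOURCE B (Python) =====
-- def fix_difference(old_word, new_word, oldtext_w_n, newtext_w, newtext_w_n, word_ind, expand_number):
--     # Splice-based rewrite: the per-word enumerate/insert loop of the original is
--     # replaced by one item assignment plus one bulk slice-assignment splice per
--     # list; mutates newtext_w / newtext_w_n in place like the original.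
--     new_word = [word for word in new_word if word != ""]
--     pos = word_ind + expand_number
--     if not new_word:
--         newtext_w.pop(pos)
--         if newtext_w_n is not None:
--             newtext_w_n.pop(pos)
--         expand_number -= 1
--     elif len(new_word) > 1 or new_word[0] != old_word:
--         newtext_w[pos] = new_word[0]
--         newtext_w[pos + 1:pos + 1] = new_word[1:]
--         if newtext_w_n is not None and len(new_word) > 1:
--             newtext_w_n[pos + 1:pos + 1] = [oldtext_w_n[word_ind]] * (len(new_word) - 1)
--         expand_number += len(new_word) - 1
--     return newtext_w, newtext_w_n, expand_number
-- ===== Notes on version B (the rewrite author's own statement) =====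
-- stated objective: simpler
-- what changed: A's per-word enumerate loop (item assignment plus repeated list.insert calls, one per extra word, into both lists) is replaced by a single item assignment plus one bulk slice-assignment splice per list; the empty-word pop branch is kept.
import Mathlib
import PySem

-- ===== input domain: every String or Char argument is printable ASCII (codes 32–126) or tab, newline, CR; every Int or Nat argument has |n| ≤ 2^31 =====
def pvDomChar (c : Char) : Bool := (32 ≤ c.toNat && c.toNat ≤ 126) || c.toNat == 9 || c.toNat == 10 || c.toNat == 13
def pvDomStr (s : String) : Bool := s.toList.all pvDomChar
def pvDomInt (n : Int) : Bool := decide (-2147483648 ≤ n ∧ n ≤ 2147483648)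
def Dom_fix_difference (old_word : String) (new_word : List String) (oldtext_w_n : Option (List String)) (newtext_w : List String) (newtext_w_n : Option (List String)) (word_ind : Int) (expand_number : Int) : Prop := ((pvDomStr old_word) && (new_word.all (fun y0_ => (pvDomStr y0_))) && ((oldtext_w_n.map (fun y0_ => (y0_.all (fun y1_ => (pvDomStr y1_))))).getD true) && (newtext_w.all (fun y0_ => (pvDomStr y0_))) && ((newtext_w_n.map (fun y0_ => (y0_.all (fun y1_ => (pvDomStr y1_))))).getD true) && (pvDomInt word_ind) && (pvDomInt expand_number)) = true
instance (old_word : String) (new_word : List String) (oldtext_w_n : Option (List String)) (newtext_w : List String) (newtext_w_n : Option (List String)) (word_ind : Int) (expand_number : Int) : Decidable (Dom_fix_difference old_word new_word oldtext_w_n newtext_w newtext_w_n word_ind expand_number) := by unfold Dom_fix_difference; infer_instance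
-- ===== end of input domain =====

-- B replaces A's per-word enumerate/insert loop by one bulk slice splice per list (simpler);
-- both A and B mutate newtext_w / newtext_w_n in place in Python — the equivalence proved
-- here is about the returned triple.

-- ===== PORT A =====
-- the 'for i, word in enumerate(new_word):' loop, as structural recursion over (words, i, state)
def fdLoopA (oldtext_w_n : Option (List String)) (word_ind : Int) :
    List String → Nat → List String × Option (List String) × Int → List String × Option (List String) × Int
  | [], _, st => st
  | word :: ws, i, (ntw, ntwn, en) =>
      if i = 0 then
        -- newtext_w[word_ind+expand_number] = word  (in range under Pre_)
        fdLoopA oldtext_w_n word_ind ws (i + 1) (PySem.List.pySetD ntw (word_ind + en) word, ntwn, en)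
      else
        -- expand_number += 1; newtext_w.insert(...); optional newtext_w_n.insert(..., oldtext_w_n[word_ind])
        fdLoopA oldtext_w_n word_ind ws (i + 1)
          (PySem.List.insert ntw (word_ind + (en + 1)) word,
           ntwn.map (fun l => PySem.List.insert l (word_ind + (en + 1))
             (PySem.List.pyGetD (oldtext_w_n.getD []) word_ind "")),  -- oldtext_w_n[word_ind]; Pre_ keeps it defined
           en + 1)

def fix_difference (old_word : String) (new_word : List String) (oldtext_w_n : Option (List String)) (newtext_w : List String) (newtext_w_n : Option (List String)) (word_ind : Int) (expand_number : Int) : List String × Option (List String) × Int :=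
  let nw := new_word.filter (fun word => word != "")
  if nw.length = 0 then
    let ntw := match PySem.List.pop? newtext_w (word_ind + expand_number) with
      | some r => r.2
      | none => newtext_w    -- IndexError; excluded by Pre_
    let ntwn := newtext_w_n.map (fun l =>
      match PySem.List.pop? l (word_ind + expand_number) with
      | some r => r.2
      | none => l)           -- IndexError; excluded by Pre_
    (ntw, ntwn, expand_number - 1)
  else if 1 < nw.length ∨ PySem.List.pyGetD nw 0 "" ≠ old_word then
    fdLoopA oldtext_w_n word_ind nw 0 (newtext_w, newtext_w_n, expand_number)
  else
    (newtext_w, newtext_w_n, expand_number)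

-- ===== PORT B =====
def fix_difference_alt (old_word : String) (new_word : List String) (oldtext_w_n : Option (List String)) (newtext_w : List String) (newtext_w_n : Option (List String)) (word_ind : Int) (expand_number : Int) : List String × Option (List String) × Int :=
  let nw := new_word.filter (fun word => word != "")
  let pos := word_ind + expand_number
  if nw.isEmpty then
    let ntw := match PySem.List.pop? newtext_w pos with
      | some r => r.2
      | none => newtext_w    -- IndexError; excluded by Pre_
    let ntwn := newtext_w_n.map (fun l =>
      match PySem.List.pop? l pos with
      | some r => r.2
      | none => l)           -- IndexError; excluded by Pre_
    (ntw, ntwn, expand_number - 1)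
  else if 1 < nw.length ∨ PySem.List.pyGetD nw 0 "" ≠ old_word then
    -- newtext_w[pos] = nw[0]  (IndexError excluded by Pre_)
    let ntw := PySem.List.pySetD newtext_w pos (PySem.List.pyGetD nw 0 "")
    -- newtext_w[pos+1:pos+1] = nw[1:]  — one bulk slice-assignment splice
    let ntw2 := PySem.List.slice ntw none (some (pos + 1)) ++ PySem.List.slice nw (some 1) none ++ PySem.List.slice ntw (some (pos + 1)) none
    -- newtext_w_n[pos+1:pos+1] = [oldtext_w_n[word_ind]] * (len(nw) - 1)
    let ntwn := if newtext_w_n ≠ none ∧ 1 < nw.length then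
        newtext_w_n.map (fun l =>
          PySem.List.slice l none (some (pos + 1)) ++
          List.replicate (nw.length - 1) (PySem.List.pyGetD (oldtext_w_n.getD []) word_ind "") ++
          PySem.List.slice l (some (pos + 1)) none)
      else newtext_w_n
    (ntw2, ntwn, expand_number + ((nw.length : Int) - 1))
  else
    (newtext_w, newtext_w_n, expand_number)

-- ===== PRECONDITION & SPEC =====
-- Pre_ excludes (a) inputs where A raises (pop / item-assignment IndexError, or a missing/too-short
-- oldtext_w_n when extra words must be inserted into newtext_w_n), and (b) negative effective
-- positions word_ind+expand_number in the replace branch when there is more than one replacement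
-- word: such positions are outside the natural domain of word positions, and there A's sequence of
-- wraparound inserts and B's single splice need not agree (pos = -1, whose inserts stay contiguous,
-- is still admitted).
def Pre_fix_difference (old_word : String) (new_word : List String) (oldtext_w_n : Option (List String)) (newtext_w : List String) (newtext_w_n : Option (List String)) (word_ind : Int) (expand_number : Int) : Prop :=
  let nw := new_word.filter (fun word => word != "")
  let pos := word_ind + expand_number
  if nw.isEmpty then
    PySem.Raise.InRange newtext_w.length pos ∧
    (∀ l, newtext_w_n = some l → PySem.Raise.InRange l.length pos)
  else if 1 < nw.length ∨ PySem.List.pyGetD nw 0 "" ≠ old_word then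
    PySem.Raise.InRange newtext_w.length pos ∧
    (1 < nw.length → -1 ≤ pos) ∧
    (1 < nw.length → newtext_w_n ≠ none →
      ∃ l, oldtext_w_n = some l ∧ PySem.Raise.InRange l.length word_ind)
  else
    True
instance (old_word : String) (new_word : List String) (oldtext_w_n : Option (List String)) (newtext_w : List String) (newtext_w_n : Option (List String)) (word_ind : Int) (expand_number : Int) : Decidable (Pre_fix_difference old_word new_word oldtext_w_n newtext_w newtext_w_n word_ind expand_number) := by unfold Pre_fix_difference; infer_instance

def pvWitness_fix_difference : String × List String × Option (List String) × List String × Option (List String) × Int × Int :=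
  ("a", ["b", "c"], some ["o"], ["x", "y"], some ["p"], 0, 0)

def Spec_fix_difference (old_word : String) (new_word : List String) (oldtext_w_n : Option (List String)) (newtext_w : List String) (newtext_w_n : Option (List String)) (word_ind : Int) (expand_number : Int) (out : List String × Option (List String) × Int) : Prop := out = fix_difference_alt old_word new_word oldtext_w_n newtext_w newtext_w_n word_ind expand_number
instance (old_word : String) (new_word : List String) (oldtext_w_n : Option (List String)) (newtext_w : List String) (newtext_w_n : Option (List String)) (word_ind : Int) (expand_number : Int) (out : List String × Option (List String) × Int) : Decidable (Spec_fix_difference old_word new_word oldtext_w_n newtext_w newtext_w_n word_ind expand_number out) := by unfold Spec_fix_difference; infer_instance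

-- ===== CLAIM (what is proved, stated in full; the proofs are below) =====
def Claim_equal_fix_difference : Prop := ∀ (old_word : String) (new_word : List String) (oldtext_w_n : Option (List String)) (newtext_w : List String) (newtext_w_n : Option (List String)) (word_ind : Int) (expand_number : Int), Dom_fix_difference old_word new_word oldtext_w_n newtext_w newtext_w_n word_ind expand_number → Pre_fix_difference old_word new_word oldtext_w_n newtext_w newtext_w_n word_ind expand_number → Spec_fix_difference old_word new_word oldtext_w_n newtext_w newtext_w_n word_ind expand_number (fix_difference old_word new_word oldtext_w_n newtext_w newtext_w_n word_ind expand_number)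

-- ===== LEMMAS AND PROOFS =====

theorem fdInsert_nonneg {α : Type} (xs : List α) (i : Int) (v : α) (hi : 0 ≤ i) :
    PySem.List.insert xs i v = xs.take i.toNat ++ v :: xs.drop i.toNat := by
  simp only [PySem.List.insert, PySem.List.sliceIndices]
  norm_num
  rw [if_neg (by omega)]
  rcases le_or_gt (xs.length : Int) i with h | h
  · have h1 : min i (xs.length:Int) = (xs.length:Int) := by omega
    rw [h1]
    have h2 : xs.length ≤ i.toNat := by omega
    simp [List.take_of_length_le, List.drop_eq_nil_of_le, h2]
  · have h1 : min i (xs.length:Int) = i := by omega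
    rw [h1]
theorem fdTake_succ {α : Type} (xs : List α) (n : Nat) (v : α) :
    (xs.take n ++ v :: xs.drop n).take (n + 1) = xs.take n ++ [v] := by
  rcases le_or_gt n xs.length with h | h
  · rw [List.take_append, List.take_take]
    have h1 : min (n+1) n = n := by omega
    have h2 : n + 1 - (xs.take n).length = 1 := by simp [List.length_take]; omega
    rw [h1, h2]
    simp
  · have hd : xs.drop n = [] := List.drop_eq_nil_of_le (by omega)
    have ht : xs.take n = xs := List.take_of_length_le (by omega)
    rw [hd, ht]
    exact List.take_of_length_le (by simp; omega)
theorem fdDrop_succ {α : Type} (xs : List α) (n : Nat) (v : α) :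
    (xs.take n ++ v :: xs.drop n).drop (n + 1) = xs.drop n := by
  rcases le_or_gt n xs.length with h | h
  · rw [List.drop_append]
    have h1 : (xs.take n).length = n := by simp [List.length_take]; omega
    rw [List.drop_eq_nil_of_le (by omega : (xs.take n).length ≤ n + 1), h1]
    simp
  · have hd : xs.drop n = [] := List.drop_eq_nil_of_le (by omega)
    have ht : xs.take n = xs := List.take_of_length_le (by omega)
    rw [hd, ht]
    exact List.drop_eq_nil_of_le (by simp; omega)

theorem fdLoopA_tail (o : Option (List String)) (wi : Int) (ws : List String) :
    ∀ (i : Nat), i ≠ 0 → ∀ (ntw : List String) (ntwn : Option (List String)) (en : Int), 0 ≤ wi + en + 1 →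
    fdLoopA o wi ws i (ntw, ntwn, en) =
      (ntw.take (wi + en + 1).toNat ++ ws ++ ntw.drop (wi + en + 1).toNat,
       ntwn.map (fun l => l.take (wi + en + 1).toNat ++
         List.replicate ws.length (PySem.List.pyGetD (o.getD []) wi "") ++
         l.drop (wi + en + 1).toNat),
       en + ws.length) := by
  induction ws with
  | nil =>
      intro i hi ntw ntwn en hen
      cases ntwn <;> simp [fdLoopA]
  | cons w ws ih =>
      intro i hi ntw ntwn en hen
      simp only [fdLoopA, if_neg hi]
      rw [ih (i+1) (by omega) _ _ (en+1) (by omega)]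
      have hm : (wi + (en + 1)).toNat = (wi + en + 1).toNat := by omega
      have hm' : (wi + (en + 1) + 1).toNat = (wi + en + 1).toNat + 1 := by omega
      have hm2 : 0 ≤ wi + (en + 1) := by omega
      rw [fdInsert_nonneg _ _ _ hm2, hm, hm']
      set n1 := (wi + en + 1).toNat with hn1
      refine Prod.ext ?_ (Prod.ext ?_ ?_)
      · simp only [fdTake_succ, fdDrop_succ]
        simp
      · cases ntwn with
        | none => simp
        | some l =>
            simp only [Option.map_some]
            rw [fdInsert_nonneg _ _ _ hm2, hm]
            simp only [fdTake_succ, fdDrop_succ, List.length_cons, List.replicate_succ]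
            simp
      · simp only [List.length_cons]
        push_cast
        ring

-- an empty splice xs[i:i] = [] is the identity, for any i
theorem fdSplice_id {α : Type} (xs : List α) (i : Int) :
    PySem.List.slice xs none (some i) ++ PySem.List.slice xs (some i) none = xs := by
  simp only [PySem.List.slice]
  rw [List.take_of_length_le (l := xs.drop (PySem.List.clampIdx xs.length i)) (by simp)]
  simp [List.take_append_drop]

-- ===== VERDICT (by name: the statement is the Claim_ definition above) =====
theorem fix_difference_spec : Claim_equal_fix_difference := by
  intro ow nwl otn ntw ntwn wi en hDom hPre
  unfold Spec_fix_difference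
  rcases hnw : nwl.filter (fun word => word != "") with _ | ⟨w0, rest⟩
  · simp [fix_difference, fix_difference_alt, hnw]
  · by_cases hc : 0 < rest.length ∨ ¬ w0 = ow
    · simp only [Pre_fix_difference] at hPre
      rw [hnw] at hPre
      simp [hc, PySem.Raise.InRange] at hPre
      rcases rest with _ | ⟨r0, rs⟩
      · -- a single replacement word ≠ old_word: both sides are the item assignment
        simp [fix_difference, fix_difference_alt, hnw, fdLoopA, fdSplice_id,
              PySem.List.slice_from _ (by norm_num : (0:Int) ≤ 1)]
      · obtain ⟨⟨hlo, hhi⟩, hpos0, h2⟩ := hPre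
        have h0 : (0:Int) ≤ wi + en + 1 := by have := hpos0 (by simp); omega
        simp [fix_difference, fix_difference_alt, hnw]
        set v := PySem.List.pyGetD (otn.getD []) wi "" with hv
        set S := PySem.List.pySetD ntw (wi + en) w0 with hS
        have hstep : fdLoopA otn wi (w0 :: r0 :: rs) 0 (ntw, ntwn, en)
            = fdLoopA otn wi (r0 :: rs) 1 (S, ntwn, en) := by
          simp [fdLoopA, hS]
        rw [hstep, fdLoopA_tail otn wi (r0 :: rs) 1 (by omega) _ _ en h0]
        have hsl2 : ∀ l : List String, PySem.List.slice l none (some (wi + en + 1)) = l.take (wi + en + 1).toNat := by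
          intro l
          rw [PySem.List.slice_to l h0]
        have hsl3 : ∀ l : List String, PySem.List.slice l (some (wi + en + 1)) = l.drop (wi + en + 1).toNat := by
          intro l
          rw [PySem.List.slice_from l h0]
        refine Prod.ext ?_ (Prod.ext ?_ ?_)
        · simp only [hsl2, hsl3, PySem.List.slice_from _ (by norm_num : (0:Int) ≤ 1)]
          simp
        · rcases ntwn with _ | l
          · simp
          · simp [hsl2, hsl3, ← hv]
        · simp
    · simp [fix_difference, fix_difference_alt, hnw, hc]
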